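-- pv_equiv track=rewrite | github.com/mohamedmehdawy/leetcode_problems | Problem #1 Manual System Stack/master.py | f_stk
-- ===== SOURCE A (Python) =====
-- def f_stk(n):
--     """
--         this function simulate stack of recursion for function f
--         parameters:
--             n: the number
--         returns:
--             the result after end simulate for recursion
--     """
--     # init stack
--     stack = []
--
--     while n > 1:
--         if n % 3 == 0:
--             stack.append(6)
--             n = n - 1 - n % 3
--         else:
--             stack.append(8)
--             n = n - 1 - n % 2
--     # init result
--     result = 5
--
--     # make stack empty
--     while stack:
--         result += stack[-1]
--         stack.pop()
--
--     return result
-- ===== SOURCE B (Python) =====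
-- def f_stk(n):
--     # Closed form: the loop decreases n by 1 or 2 with a push of 6 or 8 per step,
--     # and the total is periodic in n mod 6: f(n) = 5n + c(n % 6) for n > 1, else 5.
--     if n <= 1:
--         return 5
--     return 5 * n + (3, 0, 3, 4, 7, 2)[n % 6]
-- ===== Notes on version B (the rewrite author's own statement) =====
-- stated objective: faster
-- what changed: Replaced the O(n) simulation loop (building a stack and summing it) by an O(1) closed form 5*n + table[n % 6] derived from the periodicity of the residue transitions.
import Mathlib
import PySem

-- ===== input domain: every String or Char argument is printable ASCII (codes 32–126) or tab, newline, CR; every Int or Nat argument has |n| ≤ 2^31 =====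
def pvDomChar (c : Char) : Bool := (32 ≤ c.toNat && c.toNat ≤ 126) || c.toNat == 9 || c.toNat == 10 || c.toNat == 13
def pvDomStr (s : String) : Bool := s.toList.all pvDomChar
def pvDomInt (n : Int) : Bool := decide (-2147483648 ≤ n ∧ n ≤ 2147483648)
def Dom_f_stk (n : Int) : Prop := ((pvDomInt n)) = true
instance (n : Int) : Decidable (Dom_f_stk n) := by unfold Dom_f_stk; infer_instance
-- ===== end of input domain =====

-- ===== PORT A =====
-- B is an O(1) closed form (5*n + table[n % 6]); equality with A's O(n) simulation proved below.
-- while n > 1: push 6 or 8 and decrease n (transliteration of A's first loop)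
def f_stkLoop (n : Int) (stack : List Int) : List Int :=
  if n > 1 then
    if PySem.Int.mod n 3 = 0 then
      f_stkLoop (n - 1 - PySem.Int.mod n 3) (stack ++ [6])
    else
      f_stkLoop (n - 1 - PySem.Int.mod n 2) (stack ++ [8])
  else stack
termination_by n.toNat
decreasing_by
  · have := PySem.Int.mod_nonneg (a := n) (b := 3) (by norm_num)
    omega
  · have := PySem.Int.mod_nonneg (a := n) (b := 2) (by norm_num)
    omega

-- while stack: result += stack[-1]; stack.pop() (transliteration of A's second loop)
def f_stkDrain (stack : List Int) (result : Int) : Int :=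
  if hne : stack = [] then result
  else f_stkDrain stack.dropLast (result + stack.getLast hne)
termination_by stack.length
decreasing_by
  rw [List.length_dropLast]
  have : stack.length ≠ 0 := fun h => hne (List.eq_nil_of_length_eq_zero h)
  omega

def f_stk (n : Int) : Int :=
  f_stkDrain (f_stkLoop n []) 5

-- ===== PORT B =====
-- the tuple (3, 0, 3, 4, 7, 2); index n % 6 is always in range, so getD's default is never used
def pvTable : List Int := [3, 0, 3, 4, 7, 2]

def f_stk_alt (n : Int) : Int :=
  if n ≤ 1 then 5
  else 5 * n + (PySem.List.pyGet? pvTable (PySem.Int.mod n 6)).getD 0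

-- ===== PRECONDITION & SPEC =====
def Spec_f_stk (n : Int) (out : Int) : Prop := out = f_stk_alt n
instance (n : Int) (out : Int) : Decidable (Spec_f_stk n out) := by unfold Spec_f_stk; infer_instance

-- ===== CLAIM (what is proved, stated in full; the proofs are below) =====
def Claim_equal_f_stk : Prop := ∀ (n : Int), Dom_f_stk n → Spec_f_stk n (f_stk n)

-- ===== LEMMAS AND PROOFS =====
theorem pv_drain_eq (s : List Int) (r : Int) : f_stkDrain s r = r + s.sum := by
  fun_induction f_stkDrain s r with
  | case1 r2 => simp
  | case2 st r2 h ih =>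
    rw [ih]
    have h3 : (st.dropLast ++ [st.getLast h]).sum = st.sum := by
      rw [List.dropLast_append_getLast h]
    simp [List.sum_append] at h3
    omega

theorem pv_alt_step3 (n : Int) (h1 : 1 < n) (h3 : PySem.Int.mod n 3 = 0) :
    f_stk_alt n = f_stk_alt (n - 1 - PySem.Int.mod n 3) + 6 := by
  have e3 : PySem.Int.mod n 3 = n % 3 := PySem.Int.mod_eq_emod_of_pos (by norm_num)
  have e6 : PySem.Int.mod n 6 = n % 6 := PySem.Int.mod_eq_emod_of_pos (by norm_num)
  rw [e3] at h3 ⊢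
  have e6' : PySem.Int.mod (n - 1 - n % 3) 6 = (n - 1 - n % 3) % 6 :=
    PySem.Int.mod_eq_emod_of_pos (by norm_num)
  unfold f_stk_alt
  rw [e6, e6']
  have h6 : n % 6 = 0 ∨ n % 6 = 3 := by omega
  rcases h6 with h6 | h6
  · have ha : (n - 1 - n % 3) % 6 = 5 := by omega
    rw [h6, ha]
    split_ifs <;> first | omega | (simp [pvTable, PySem.List.pyGet?, PySem.List.pyIdx?]; omega)
  · have ha : (n - 1 - n % 3) % 6 = 2 := by omega
    rw [h6, ha]
    split_ifs <;> first | omega | (simp [pvTable, PySem.List.pyGet?, PySem.List.pyIdx?]; omega)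

theorem pv_alt_step2 (n : Int) (h1 : 1 < n) (h3 : ¬ PySem.Int.mod n 3 = 0) :
    f_stk_alt n = f_stk_alt (n - 1 - PySem.Int.mod n 2) + 8 := by
  have e3 : PySem.Int.mod n 3 = n % 3 := PySem.Int.mod_eq_emod_of_pos (by norm_num)
  have e2 : PySem.Int.mod n 2 = n % 2 := PySem.Int.mod_eq_emod_of_pos (by norm_num)
  have e6 : PySem.Int.mod n 6 = n % 6 := PySem.Int.mod_eq_emod_of_pos (by norm_num)
  rw [e3] at h3
  rw [e2]
  have e6' : PySem.Int.mod (n - 1 - n % 2) 6 = (n - 1 - n % 2) % 6 :=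
    PySem.Int.mod_eq_emod_of_pos (by norm_num)
  unfold f_stk_alt
  rw [e6, e6']
  have h6 : n % 6 = 1 ∨ n % 6 = 2 ∨ n % 6 = 4 ∨ n % 6 = 5 := by omega
  rcases h6 with h6 | h6 | h6 | h6
  · have ha : (n - 1 - n % 2) % 6 = 5 := by omega
    rw [h6, ha]
    split_ifs <;> first | omega | (simp [pvTable, PySem.List.pyGet?, PySem.List.pyIdx?]; omega)
  · have ha : (n - 1 - n % 2) % 6 = 1 := by omega
    rw [h6, ha]
    split_ifs <;> first | omega | (simp [pvTable, PySem.List.pyGet?, PySem.List.pyIdx?]; omega)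
  · have ha : (n - 1 - n % 2) % 6 = 3 := by omega
    rw [h6, ha]
    split_ifs <;> first | omega | (simp [pvTable, PySem.List.pyGet?, PySem.List.pyIdx?]; omega)
  · have ha : (n - 1 - n % 2) % 6 = 3 := by omega
    rw [h6, ha]
    split_ifs <;> first | omega | (simp [pvTable, PySem.List.pyGet?, PySem.List.pyIdx?]; omega)

theorem pv_loop_sum (n : Int) (s : List Int) :
    (f_stkLoop n s).sum + 5 = s.sum + f_stk_alt n := by
  fun_induction f_stkLoop n s with
  | case1 n s h h3 ih =>
    rw [ih, pv_alt_step3 n h h3]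
    simp [List.sum_append]
    omega
  | case2 n s h h3 ih =>
    rw [ih, pv_alt_step2 n h h3]
    simp [List.sum_append]
    omega
  | case3 n s h =>
    unfold f_stk_alt
    rw [if_pos (by omega : n ≤ 1)]

-- ===== VERDICT (by name: the statement is the Claim_ definition above) =====
theorem f_stk_spec : Claim_equal_f_stk := by
  intro n _
  unfold Spec_f_stk f_stk
  rw [pv_drain_eq]
  have := pv_loop_sum n []
  simp at this
  omega
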